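-- pv_equiv track=rewrite | github.com/YuHuanTin/IDAPyUtils | X64Dbg/main.py | GetDirtyRanges
-- ===== SOURCE A (Python) =====
-- def MergeRanges(ranges: list[tuple[int, int]]) -> list[tuple[int, int]]:
--     if not ranges:
--         return []
--     ranges = sorted((start, end) for start, end in ranges if end > start)
--     merged: list[list[int]] = []
--     for start, end in ranges:
--         if not merged or start > merged[-1][1]:
--             merged.append([start, end])
--         else:
--             merged[-1][1] = max(merged[-1][1], end)
--     return [(start, end) for start, end in merged]
--
-- def GetDirtyRanges(state, start: int, end: int) -> list[tuple[int, int]]: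
--     if state is None:
--         return []
--     ranges = []
--     for dirty_start, dirty_end in state.get('uc_dirty_ranges', []):
--         overlap_start = max(start, dirty_start)
--         overlap_end = min(end, dirty_end)
--         if overlap_end > overlap_start:
--             ranges.append((overlap_start, overlap_end))
--     return MergeRanges(ranges)
-- ===== SOURCE B (Python) =====
-- def GetDirtyRanges(state, start: int, end: int) -> list[tuple[int, int]]:
--     if state is None:
--         return []
--     clipped = [(max(start, s), min(end, e))
--                for s, e in state.get('uc_dirty_ranges', [])
--                if min(end, e) > max(start, s)]
--     merged = []
--     # build the merged list back-to-front: walk the clipped intervals from the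
--     # largest downwards and absorb every already-merged interval it reaches
--     for s, e in reversed(sorted(clipped)):
--         while merged and merged[0][0] <= e:
--             e = max(e, merged.pop(0)[1])
--         merged.insert(0, (s, e))
--     return merged
-- ===== Notes on version B (the rewrite author's own statement) =====
-- stated objective: alternative
-- what changed: B clips in one comprehension and merges back-to-front: it walks the sorted clipped intervals in reverse, absorbing every already-merged interval the current one reaches and prepending, instead of A's forward pass that appends or extends the last merged interval (plus A's separate MergeRanges helper with its redundant re-filter and list-of-lists rebuild).
import Mathlib
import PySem

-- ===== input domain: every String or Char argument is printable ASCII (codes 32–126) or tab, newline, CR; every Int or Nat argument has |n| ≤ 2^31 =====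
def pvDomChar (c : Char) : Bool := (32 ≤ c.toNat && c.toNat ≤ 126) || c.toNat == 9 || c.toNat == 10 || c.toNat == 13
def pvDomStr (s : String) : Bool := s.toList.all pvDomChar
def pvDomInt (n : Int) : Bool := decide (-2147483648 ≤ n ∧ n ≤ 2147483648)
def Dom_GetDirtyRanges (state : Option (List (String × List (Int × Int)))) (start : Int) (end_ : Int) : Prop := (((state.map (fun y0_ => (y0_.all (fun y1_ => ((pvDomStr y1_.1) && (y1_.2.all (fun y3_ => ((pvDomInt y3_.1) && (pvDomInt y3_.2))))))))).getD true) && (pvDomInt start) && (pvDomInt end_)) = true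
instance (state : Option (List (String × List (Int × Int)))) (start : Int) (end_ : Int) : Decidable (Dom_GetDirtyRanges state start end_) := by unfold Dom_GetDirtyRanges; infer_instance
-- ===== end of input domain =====

-- B merges back-to-front (reverse sweep absorbing already-merged intervals) instead of A's
-- forward append-or-extend-last pass; equal return value proved on the whole domain (alternative, not faster).


-- ===== PORT A =====
-- one iteration of A's merge loop: append [start, end] or extend merged[-1][1]
-- (Python's inner 2-element lists are ported as pairs; the final tuple-rebuilding
-- comprehension is then the identity)
def pvMergeStepA (merged : List (Int × Int)) (p : Int × Int) : List (Int × Int) :=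
  match merged.getLast? with
  | none => merged ++ [p]                               -- `not merged` branch
  | some q =>
    if p.1 > q.2 then merged ++ [p]                     -- start > merged[-1][1]
    else merged.dropLast ++ [(q.1, max q.2 p.2)]        -- merged[-1][1] = max(…)

def MergeRanges (ranges : List (Int × Int)) : List (Int × Int) :=
  if ranges = [] then []
  else
    (PySem.List.sorted2 (ranges.filter (fun p => p.2 > p.1))
      (fun p => p.1) (fun p => p.2) false).foldl pvMergeStepA []

def GetDirtyRanges (state : Option (List (String × List (Int × Int)))) (start : Int) (end_ : Int) : List (Int × Int) :=
  match state with
  | none => []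
  | some st =>
    let ranges := (PySem.Dict.getD ⟨st⟩ "uc_dirty_ranges" []).foldl
      (fun acc d =>
        let overlap_start := max start d.1
        let overlap_end := min end_ d.2
        if overlap_end > overlap_start then acc ++ [(overlap_start, overlap_end)] else acc) []
    MergeRanges ranges

-- ===== PORT B =====
-- the `while merged and merged[0][0] <= e:` absorption loop of Source B
def pvAbsorb (e : Int) (merged : List (Int × Int)) : Int × List (Int × Int) :=
  match merged with
  | [] => (e, [])
  | (a, b) :: t => if a ≤ e then pvAbsorb (max e b) t else (e, (a, b) :: t)

-- one iteration of Source B's `for s, e in reversed(sorted(clipped))` loop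
def pvMergeStepB (merged : List (Int × Int)) (p : Int × Int) : List (Int × Int) :=
  let r := pvAbsorb p.2 merged
  (p.1, r.1) :: r.2

def GetDirtyRanges_alt (state : Option (List (String × List (Int × Int)))) (start : Int) (end_ : Int) : List (Int × Int) :=
  match state with
  | none => []
  | some st =>
    let clipped := (PySem.Dict.getD ⟨st⟩ "uc_dirty_ranges" []).filterMap
      (fun d => if min end_ d.2 > max start d.1 then some (max start d.1, min end_ d.2) else none)
    ((PySem.List.sorted2 clipped (fun p => p.1) (fun p => p.2) false).reverse).foldl pvMergeStepB []

-- ===== PRECONDITION & SPEC =====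
def Spec_GetDirtyRanges (state : Option (List (String × List (Int × Int)))) (start : Int) (end_ : Int) (out : List (Int × Int)) : Prop := out = GetDirtyRanges_alt state start end_
instance (state : Option (List (String × List (Int × Int)))) (start : Int) (end_ : Int) (out : List (Int × Int)) : Decidable (Spec_GetDirtyRanges state start end_ out) := by unfold Spec_GetDirtyRanges; infer_instance

-- ===== CLAIM (what is proved, stated in full; the proofs are below) =====
def Claim_equal_GetDirtyRanges : Prop := ∀ (state : Option (List (String × List (Int × Int)))) (start : Int) (end_ : Int), Dom_GetDirtyRanges state start end_ → Spec_GetDirtyRanges state start end_ (GetDirtyRanges state start end_)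

-- ===== LEMMAS AND PROOFS =====

-- canonical recursive form of A's merge of a list seeded with (s, e)
def pvGo (s e : Int) : List (Int × Int) → List (Int × Int)
  | [] => [(s, e)]
  | (a, b) :: t => if a > e then (s, e) :: pvGo a b t else pvGo s (max e b) t

-- foldr form of B's reversed loop
def pvBMerge (l : List (Int × Int)) : List (Int × Int) :=
  l.foldr (fun x acc => pvMergeStepB acc x) []

theorem pvGo_cons (s e a b : Int) (t : List (Int × Int)) :
    pvGo s e ((a, b) :: t) = if a > e then (s, e) :: pvGo a b t else pvGo s (max e b) t := rfl

theorem pvAbsorb_cons (e a b : Int) (t : List (Int × Int)) :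
    pvAbsorb e ((a, b) :: t) = if a ≤ e then pvAbsorb (max e b) t else (e, (a, b) :: t) := rfl

theorem pvStepB (m : List (Int × Int)) (p : Int × Int) :
    pvMergeStepB m p = (p.1, (pvAbsorb p.2 m).1) :: (pvAbsorb p.2 m).2 := rfl

-- A's step only ever touches the last element, so a prefix factors out
theorem pvFoldA_factor (l : List (Int × Int)) : ∀ (acc : List (Int × Int)) (p : Int × Int),
    l.foldl pvMergeStepA (acc ++ [p]) = acc ++ l.foldl pvMergeStepA [p] := by
  induction l with
  | nil => intro acc p; rfl
  | cons x t ih =>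
    intro acc p
    simp only [List.foldl_cons]
    have hstep : pvMergeStepA (acc ++ [p]) x =
        if x.1 > p.2 then (acc ++ [p]) ++ [x] else acc ++ [(p.1, max p.2 x.2)] := by
      simp [pvMergeStepA]
    by_cases h : x.1 > p.2
    · rw [hstep]; simp only [if_pos h]
      have h1 : pvMergeStepA [p] x = [p] ++ [x] := by simp [pvMergeStepA, h]
      rw [h1, ih (acc ++ [p]) x, ih [p] x, List.append_assoc]
    · rw [hstep]; simp only [if_neg h]
      have h1 : pvMergeStepA [p] x = [(p.1, max p.2 x.2)] := by simp [pvMergeStepA, h]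
      rw [h1, ih acc (p.1, max p.2 x.2)]

theorem pvFoldA_eq_go (l : List (Int × Int)) : ∀ (s e : Int),
    l.foldl pvMergeStepA [(s, e)] = pvGo s e l := by
  induction l with
  | nil => intro s e; rfl
  | cons x t ih =>
    intro s e
    obtain ⟨a, b⟩ := x
    simp only [List.foldl_cons, pvGo_cons]
    by_cases h : a > e
    · have h1 : pvMergeStepA [(s, e)] (a, b) = [(s, e)] ++ [(a, b)] := by simp [pvMergeStepA, h]
      rw [h1, if_pos h, pvFoldA_factor, ih]; rfl
    · have h1 : pvMergeStepA [(s, e)] (a, b) = [(s, max e b)] := by simp [pvMergeStepA, h]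
      rw [h1, if_neg h, ih]

theorem pvGo_head (l : List (Int × Int)) : ∀ (s e : Int),
    ∃ e' t, pvGo s e l = (s, e') :: t := by
  induction l with
  | nil => intro s e; exact ⟨e, [], rfl⟩
  | cons x t ih =>
    intro s e
    obtain ⟨a, b⟩ := x
    by_cases h : a > e
    · exact ⟨e, pvGo a b t, by rw [pvGo_cons, if_pos h]⟩
    · obtain ⟨e', t', ht⟩ := ih s (max e b)
      exact ⟨e', t', by rw [pvGo_cons, if_neg h, ht]⟩

-- B's absorption step applied to a merged tail re-merges it with the larger end
theorem pvAbsorb_go (l : List (Int × Int)) : ∀ (s e s' e' : Int), s' ≤ e →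
    pvMergeStepB (pvGo s' e' l) (s, e) = pvGo s (max e e') l := by
  induction l with
  | nil =>
    intro s e s' e' h
    simp [pvGo, pvMergeStepB, pvAbsorb, h]
  | cons x t ih =>
    intro s e s' e' h
    obtain ⟨a, b⟩ := x
    by_cases h1 : a > e'
    · rw [show pvGo s' e' ((a, b) :: t) = (s', e') :: pvGo a b t from by
        rw [pvGo_cons, if_pos h1]]
      by_cases h2 : a > max e e'
      · obtain ⟨eb, tb, htb⟩ := pvGo_head t a b
        have habs : pvAbsorb e ((s', e') :: pvGo a b t) = (max e e', pvGo a b t) := by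
          rw [pvAbsorb_cons, if_pos h, htb, pvAbsorb_cons, if_neg (by omega), ← htb]
        rw [pvStepB, habs, pvGo_cons, if_pos h2]
      · have hle : a ≤ max e e' := by omega
        have hB : pvMergeStepB ((s', e') :: pvGo a b t) (s, e) =
            pvMergeStepB (pvGo a b t) (s, max e e') := by
          simp [pvStepB, pvAbsorb_cons, h]
        rw [hB, ih s (max e e') a b hle, pvGo_cons, if_neg h2]
    · rw [show pvGo s' e' ((a, b) :: t) = pvGo s' (max e' b) t from by
        rw [pvGo_cons, if_neg h1],
        ih s e s' (max e' b) h, pvGo_cons, if_neg (show ¬ a > max e e' by omega)]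
      have : max e (max e' b) = max (max e e') b := by omega
      rw [this]

theorem pvGo_eq_bmerge (l : List (Int × Int)) : ∀ (s e : Int),
    pvGo s e l = pvMergeStepB (pvBMerge l) (s, e) := by
  induction l with
  | nil => intro s e; simp [pvGo, pvBMerge, pvMergeStepB, pvAbsorb]
  | cons x t ih =>
    intro s e
    obtain ⟨s', e'⟩ := x
    have hb : pvBMerge ((s', e') :: t) = pvGo s' e' t := by
      simp only [pvBMerge, List.foldr_cons]
      rw [← pvBMerge, ← ih s' e']
    rw [hb]
    by_cases h : s' > e
    · obtain ⟨E, tt, htt⟩ := pvGo_head t s' e'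
      have habs : pvAbsorb e ((s', E) :: tt) = (e, (s', E) :: tt) := by
        rw [pvAbsorb_cons, if_neg (by omega)]
      rw [pvGo_cons, if_pos h, htt, pvStepB, habs]
    · rw [pvGo_cons, if_neg h, pvAbsorb_go t s e s' e' (by omega)]

-- A's whole forward fold equals B's whole backward fold, on EVERY list
theorem pvMerge_eq (l : List (Int × Int)) :
    l.foldl pvMergeStepA [] = pvBMerge l := by
  cases l with
  | nil => rfl
  | cons x t =>
    obtain ⟨s, e⟩ := x
    have h0 : pvMergeStepA [] (s, e) = [(s, e)] := by simp [pvMergeStepA]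
    simp only [List.foldl_cons, h0, pvFoldA_eq_go, pvGo_eq_bmerge]
    simp [pvBMerge]

-- the clipping loop of A builds exactly B's clipping comprehension
theorem pvClip_eq (start end_ : Int) (l : List (Int × Int)) : ∀ (acc : List (Int × Int)),
    l.foldl (fun acc d =>
        let overlap_start := max start d.1
        let overlap_end := min end_ d.2
        if overlap_end > overlap_start then acc ++ [(overlap_start, overlap_end)] else acc) acc
      = acc ++ l.filterMap
          (fun d => if min end_ d.2 > max start d.1 then some (max start d.1, min end_ d.2) else none) := by
  induction l with
  | nil => intro acc; simp
  | cons x t ih =>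
    intro acc
    simp only [List.foldl_cons, List.filterMap_cons]
    by_cases h : min end_ x.2 > max start x.1
    · simp only [if_pos h, ih]; simp
    · simp only [if_neg h, ih]

-- every clipped pair already satisfies MergeRanges' re-filter
theorem pvClip_filter (start end_ : Int) (l : List (Int × Int)) :
    (l.filterMap (fun d => if min end_ d.2 > max start d.1
        then some (max start d.1, min end_ d.2) else none)).filter (fun p => p.2 > p.1)
      = l.filterMap (fun d => if min end_ d.2 > max start d.1
        then some (max start d.1, min end_ d.2) else none) := by
  apply List.filter_eq_self.mpr
  intro p hp
  obtain ⟨d, _, hd⟩ := List.mem_filterMap.mp hp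
  by_cases h : min end_ d.2 > max start d.1
  · rw [if_pos h] at hd
    obtain rfl := Option.some_injective _ hd
    simpa using h
  · rw [if_neg h] at hd; cases hd

-- glue: MergeRanges on an already-clipped list equals B's reversed sweep
theorem pvMain (l : List (Int × Int)) (hfilt : l.filter (fun p => p.2 > p.1) = l) :
    MergeRanges l
      = ((PySem.List.sorted2 l (fun p => p.1) (fun p => p.2) false).reverse).foldl pvMergeStepB [] := by
  rw [List.foldl_reverse, ← pvBMerge]
  unfold MergeRanges
  by_cases hnil : l = []
  · subst hnil
    have hs : PySem.List.sorted2 ([] : List (Int × Int)) (fun p => p.1) (fun p => p.2) false = [] :=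
      (PySem.List.sorted2_perm ..).eq_nil
    rw [if_pos rfl, hs]; rfl
  · rw [if_neg hnil, hfilt, pvMerge_eq]

-- ===== VERDICT (by name: the statement is the Claim_ definition above) =====
theorem GetDirtyRanges_spec : Claim_equal_GetDirtyRanges := by
  intro state start end_ _
  unfold Spec_GetDirtyRanges GetDirtyRanges GetDirtyRanges_alt
  cases state with
  | none => rfl
  | some st =>
    simp only [pvClip_eq, List.nil_append]
    exact pvMain _ (pvClip_filter start end_ _)
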